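-- pv_equiv track=rewrite | github.com/h-escoffier/AoC | day2.py | is_almost_adj_levels
-- ===== SOURCE A (Python) =====
-- def is_monotonic(report):
--     return all(x < y for x, y in zip(report, report[1:])) or all(x > y for x, y in zip(report, report[1:]))
--
-- def is_almost_adj_levels(report):
--     monotonic_sub_reports = []
--     n = len(report)
--     for i in range(n):
--         sub_report = report[:i] + report[i+1:]
--         if is_monotonic(sub_report):
--             monotonic_sub_reports.append(sub_report)
--     return monotonic_sub_reports
-- ===== SOURCE B (Python) =====
-- def _suf_flags(xs, lt):
--     # flags[j] == xs[j:] is a strict chain under lt; one reversed pass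
--     flags = []
--     ok = True
--     prev = None
--     for x in reversed(xs):
--         if prev is not None:
--             ok = lt(x, prev) and ok
--         flags.append(ok)
--         prev = x
--     flags.reverse()
--     return flags
--
--
-- def is_almost_adj_levels(report):
--     n = len(report)
--     suf_inc = _suf_flags(report, lambda a, b: a < b)
--     suf_dec = _suf_flags(report, lambda a, b: a > b)
--     rev = list(reversed(report))
--     # report[:j+1] strictly increasing  <=>  rev[n-1-j:] strictly decreasing
--     pre_inc = list(reversed(_suf_flags(rev, lambda a, b: a > b)))
--     pre_dec = list(reversed(_suf_flags(rev, lambda a, b: a < b)))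
--     out = []
--     for i in range(n):
--         ok_inc = ((i == 0 or pre_inc[i - 1])
--                   and (i == n - 1 or suf_inc[i + 1])
--                   and (i == 0 or i == n - 1 or report[i - 1] < report[i + 1]))
--         ok_dec = ((i == 0 or pre_dec[i - 1])
--                   and (i == n - 1 or suf_dec[i + 1])
--                   and (i == 0 or i == n - 1 or report[i - 1] > report[i + 1]))
--         if ok_inc or ok_dec:
--             out.append(report[:i] + report[i + 1:])
--     return out
-- ===== Notes on version B (the rewrite author's own statement) =====
-- stated objective: alternative
-- what changed: B precomputes prefix/suffix strict-run flags in one O(n) pass each and tests every one-element removal in O(1) (building the removed copy only when it qualifies), instead of A's rebuilding and fully rescanning every removed copy.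
import Mathlib
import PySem

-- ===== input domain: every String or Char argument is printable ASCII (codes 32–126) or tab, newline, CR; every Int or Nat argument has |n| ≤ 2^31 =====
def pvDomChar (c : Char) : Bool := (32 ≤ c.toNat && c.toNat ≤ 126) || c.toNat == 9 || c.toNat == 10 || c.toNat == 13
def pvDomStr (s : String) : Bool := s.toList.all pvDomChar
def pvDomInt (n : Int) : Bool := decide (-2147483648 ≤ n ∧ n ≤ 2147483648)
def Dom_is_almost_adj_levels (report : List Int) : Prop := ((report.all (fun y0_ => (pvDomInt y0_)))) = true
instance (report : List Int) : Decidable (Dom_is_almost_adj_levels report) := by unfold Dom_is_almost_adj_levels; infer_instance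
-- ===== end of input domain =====

-- B replaces A's O(n) monotonicity re-scan of every one-element-removed copy by precomputed
-- prefix/suffix strict-run flags, so each removal is tested in O(1) (objective: alternative algorithm).

-- ===== PORT A =====
def is_monotonic (report : List Int) : Bool :=
  (report.zip (PySem.List.slice report (some 1) none)).all (fun p => decide (p.1 < p.2)) ||
  (report.zip (PySem.List.slice report (some 1) none)).all (fun p => decide (p.1 > p.2))

def is_almost_adj_levels (report : List Int) : List (List Int) :=
  let n : Int := report.length
  (PySem.List.pyRange 0 n 1).foldl (fun acc i =>
    let sub := PySem.List.slice report none (some i) ++ PySem.List.slice report (some (i+1)) none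
    if is_monotonic sub then acc ++ [sub] else acc) []

-- ===== PORT B =====
-- port of Source B's _suf_flags: one reversed pass with state (ok, prev, flags), then flags.reverse()
def pvSufFlags (lt : Int → Int → Bool) (xs : List Int) : List Bool :=
  (xs.reverse.foldl (fun (s : Bool × Option Int × List Bool) x =>
    let ok := match s.2.1 with
      | none => s.1
      | some p => lt x p && s.1
    (ok, some x, s.2.2 ++ [ok])) (true, none, [])).2.2.reverse

def is_almost_adj_levels_alt (report : List Int) : List (List Int) :=
  let n : Int := report.length
  let suf_inc := pvSufFlags (fun a b => decide (a < b)) report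
  let suf_dec := pvSufFlags (fun a b => decide (a > b)) report
  let rev := report.reverse
  let pre_inc := (pvSufFlags (fun a b => decide (a > b)) rev).reverse
  let pre_dec := (pvSufFlags (fun a b => decide (a < b)) rev).reverse
  (PySem.List.pyRange 0 n 1).foldl (fun acc i =>
    let ok_inc := (i == 0 || PySem.List.pyGetD pre_inc (i-1) true)
               && (i == n-1 || PySem.List.pyGetD suf_inc (i+1) true)
               && (i == 0 || i == n-1 ||
                   decide (PySem.List.pyGetD report (i-1) 0 < PySem.List.pyGetD report (i+1) 0))
    let ok_dec := (i == 0 || PySem.List.pyGetD pre_dec (i-1) true)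
               && (i == n-1 || PySem.List.pyGetD suf_dec (i+1) true)
               && (i == 0 || i == n-1 ||
                   decide (PySem.List.pyGetD report (i-1) 0 > PySem.List.pyGetD report (i+1) 0))
    if (ok_inc || ok_dec) then
      acc ++ [PySem.List.slice report none (some i) ++ PySem.List.slice report (some (i+1)) none]
    else acc) []

-- ===== PRECONDITION & SPEC =====
def Spec_is_almost_adj_levels (report : List Int) (out : List (List Int)) : Prop := out = is_almost_adj_levels_alt report
instance (report : List Int) (out : List (List Int)) : Decidable (Spec_is_almost_adj_levels report out) := by unfold Spec_is_almost_adj_levels; infer_instance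

-- ===== CLAIM (what is proved, stated in full; the proofs are below) =====
def Claim_equal_is_almost_adj_levels : Prop := ∀ (report : List Int), Dom_is_almost_adj_levels report → Spec_is_almost_adj_levels report (is_almost_adj_levels report)

-- ===== LEMMAS AND PROOFS =====

-- Bool-valued strict-chain predicate (the value is_monotonic tests for one comparison)
def chainB (lt : Int → Int → Bool) : List Int → Bool
  | [] => true
  | [_] => true
  | a :: b :: t => lt a b && chainB lt (b :: t)

-- suffix flags, structurally: (flagsSpec lt xs).getD j = chainB lt (xs.drop j)
def flagsSpec (lt : Int → Int → Bool) : List Int → List Bool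
  | [] => []
  | x :: xs => chainB lt (x :: xs) :: flagsSpec lt xs

theorem chainB_cons (lt : Int → Int → Bool) (x : Int) (xs : List Int) :
    chainB lt (x :: xs) = ((match xs.head? with | none => true | some p => lt x p) && chainB lt xs) := by
  cases xs <;> simp [chainB]

theorem zip_all_eq_chainB (lt : Int → Int → Bool) (xs : List Int) :
    (xs.zip xs.tail).all (fun p => lt p.1 p.2) = chainB lt xs := by
  induction xs with
  | nil => rfl
  | cons a t ih =>
    cases t with
    | nil => rfl
    | cons b u =>
      simp only [List.tail_cons, List.zip_cons_cons, List.all_cons, chainB] at *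
      rw [← ih]

theorem pvSufFlags_eq (lt : Int → Int → Bool) (xs : List Int) :
    pvSufFlags lt xs = flagsSpec lt xs := by
  unfold pvSufFlags
  rw [List.foldl_reverse]
  have key : xs.foldr (fun x (s : Bool × Option Int × List Bool) =>
      let ok := match s.2.1 with
        | none => s.1
        | some p => lt x p && s.1
      (ok, some x, s.2.2 ++ [ok])) (true, none, [])
      = (chainB lt xs, xs.head?, (flagsSpec lt xs).reverse) := by
    induction xs with
    | nil => rfl
    | cons a t ih =>
      rw [List.foldr_cons, ih]
      simp only [flagsSpec, List.reverse_cons]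
      rw [chainB_cons]
      cases t <;> simp [chainB]
  rw [key]
  simp

theorem length_flagsSpec (lt : Int → Int → Bool) (xs : List Int) :
    (flagsSpec lt xs).length = xs.length := by
  induction xs with
  | nil => rfl
  | cons a t ih => simp [flagsSpec, ih]

theorem getD_flagsSpec (lt : Int → Int → Bool) (xs : List Int) (j : Nat) (h : j < xs.length) :
    (flagsSpec lt xs).getD j true = chainB lt (xs.drop j) := by
  induction xs generalizing j with
  | nil => simp at h
  | cons a t ih =>
    cases j with
    | zero => simp [flagsSpec]
    | succ j' =>
      simp only [flagsSpec, List.getD_cons_succ, List.drop_succ_cons]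
      exact ih j' (by simpa using h)

theorem chainB_append (lt : Int → Int → Bool) (l1 l2 : List Int) :
    chainB lt (l1 ++ l2) =
      (chainB lt l1 && chainB lt l2 &&
        (match l1.getLast?, l2.head? with
          | some a, some b => lt a b
          | _, _ => true)) := by
  induction l1 with
  | nil => simp [chainB]
  | cons a t ih =>
    cases t with
    | nil =>
      simp only [List.nil_append, List.cons_append]
      rw [chainB_cons]
      cases l2 <;> simp [chainB, Bool.and_comm]
    | cons b u =>
      simp only [List.cons_append] at *
      rw [show chainB lt (a :: b :: (u ++ l2)) = (lt a b && chainB lt (b :: (u ++ l2))) from rfl]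
      rw [ih]
      rw [show chainB lt (a :: b :: u) = (lt a b && chainB lt (b :: u)) from rfl]
      rw [List.getLast?_cons_cons]
      simp [Bool.and_assoc]

theorem chainB_reverse (lt : Int → Int → Bool) (xs : List Int) :
    chainB lt xs.reverse = chainB (fun a b => lt b a) xs := by
  induction xs with
  | nil => rfl
  | cons a t ih =>
    rw [List.reverse_cons, chainB_append, ih, chainB_cons]
    cases t with
    | nil => simp [chainB]
    | cons b u =>
      simp only [chainB]
      have : (b :: u).reverse.getLast? = some b := by
        simp [List.getLast?_reverse]
      simp [Bool.and_comm]

theorem takeLast (l : List Int) (k : Nat) (h1 : 1 ≤ k) (h2 : k ≤ l.length) :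
    (l.take k).getLast? = l[k-1]? := by
  rw [List.getLast?_eq_getElem?, List.getElem?_take, List.length_take]
  have hm : min k l.length = k := by omega
  rw [hm, if_pos (by omega)]

-- the key pointwise fact for ONE comparison direction
theorem chain_removed (lt : Int → Int → Bool) (report : List Int) (k : Nat) (hk : k < report.length) :
    chainB lt (report.take k ++ report.drop (k+1)) =
      ((k == 0 || ((flagsSpec (fun a b => lt b a) report.reverse).reverse.getD (k-1) true))
        && (k == report.length - 1 || (flagsSpec lt report).getD (k+1) true)
        && (k == 0 || k == report.length - 1 ||
             lt (report.getD (k-1) 0) (report.getD (k+1) 0))) := by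
  rw [chainB_append]
  congr 1
  · congr 1
    · -- prefix part
      by_cases h0 : k = 0
      · subst h0; simp [chainB]
      · have hk1 : 1 ≤ k := by omega
        have hlen : (flagsSpec (fun a b => lt b a) report.reverse).length = report.length := by
          rw [length_flagsSpec, List.length_reverse]
        have hidx : k - 1 < (flagsSpec (fun a b => lt b a) report.reverse).reverse.length := by
          simp [hlen]; omega
        rw [List.getD_eq_getElem _ _ hidx, List.getElem_reverse]
        have hlt : (flagsSpec (fun a b => lt b a) report.reverse).length - 1 - (k-1) < (flagsSpec (fun a b => lt b a) report.reverse).length := by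
          simp [hlen]; omega
        rw [← List.getD_eq_getElem _ true hlt]
        rw [getD_flagsSpec _ _ _ (by simp [hlen] at hlt ⊢; omega)]
        have hdrop : report.reverse.drop ((flagsSpec (fun a b => lt b a) report.reverse).length - 1 - (k-1))
            = (report.take k).reverse := by
          rw [List.reverse_take, hlen]
          congr 1; omega
        rw [hdrop, chainB_reverse]
        simp [Bool.beq_eq_decide_eq]
        omega
    · -- suffix part
      by_cases hl : k = report.length - 1
      · have hdrop : report.drop (k+1) = [] := by
          apply List.drop_eq_nil_of_le; omega
        rw [hdrop]
        simp [chainB, hl]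
      · have hidx : k + 1 < report.length := by omega
        rw [getD_flagsSpec _ _ _ hidx]
        simp [Bool.beq_eq_decide_eq]
        omega
  · -- bridge part
    by_cases h0 : k = 0
    · subst h0; simp
    · by_cases hl : k = report.length - 1
      · have hdrop : report.drop (k+1) = [] := by
          apply List.drop_eq_nil_of_le; omega
        rw [hdrop]
        simp [hl]
      · have h1 : (report.take k).getLast? = report[k-1]? := takeLast report k (by omega) (by omega)
        have h2 : (report.drop (k+1)).head? = report[k+1]? := List.head?_drop
        rw [h1, h2]
        have e1 : report[k-1]? = some report[k-1] := List.getElem?_eq_getElem (by omega)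
        have e2 : report[k+1]? = some report[k+1] := List.getElem?_eq_getElem (by omega)
        rw [e1, e2]
        have g1 : report.getD (k-1) 0 = report[k-1] := List.getD_eq_getElem _ _ (by omega)
        have g2 : report.getD (k+1) 0 = report[k+1] := List.getD_eq_getElem _ _ (by omega)
        rw [g1, g2]
        simp [Bool.beq_eq_decide_eq]
        intro h; omega

-- ===== VERDICT (by name: the statement is the Claim_ definition above) =====
theorem is_almost_adj_levels_spec : Claim_equal_is_almost_adj_levels := by
  intro report _
  unfold Spec_is_almost_adj_levels is_almost_adj_levels is_almost_adj_levels_alt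
  simp only [pvSufFlags_eq]
  rw [PySem.List.foldl_append_if, PySem.List.foldl_append_if]
  simp only [List.nil_append]
  congr 1
  apply List.filter_congr
  intro i hi
  have hmem := (PySem.List.mem_pyRange_one).1 hi
  obtain ⟨hi0, hin⟩ := hmem
  obtain ⟨k, rfl⟩ : ∃ k : Nat, i = (k : Int) := ⟨i.toNat, by omega⟩
  have hk : k < report.length := by omega
  -- normalize slices and indices
  have e1 : PySem.List.slice report none (some (k : Int)) = report.take k :=
    PySem.List.slice_to_natCast report k
  have e2 : PySem.List.slice report (some ((k : Int) + 1)) none = report.drop (k+1) := by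
    have : (k : Int) + 1 = ((k+1 : Nat) : Int) := by push_cast; ring
    rw [this]; exact PySem.List.slice_from_natCast report (k+1)
  rw [e1, e2]
  -- A side: is_monotonic = chainB < || chainB >
  have hmono : ∀ l : List Int, is_monotonic l =
      (chainB (fun a b => decide (a < b)) l || chainB (fun a b => decide (a > b)) l) := by
    intro l
    unfold is_monotonic
    rw [PySem.List.slice_from_one]
    rw [zip_all_eq_chainB (fun a b => decide (a < b)) l,
        zip_all_eq_chainB (fun a b => decide (a > b)) l]
  rw [hmono]
  rw [chain_removed (fun a b => decide (a < b)) report k hk,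
      chain_removed (fun a b => decide (a > b)) report k hk]
  by_cases h0 : k = 0
  · subst h0
    have hb : ((0:Int) == (report.length:Int) - 1) = (0 == report.length - 1) := by
      simp [Bool.beq_eq_decide_eq]; omega
    have hp : ∀ (l : List Bool), PySem.List.pyGetD l (1:Int) true = l[1]?.getD true := by
      intro l
      rw [show (1:Int) = ((1:Nat):Int) by norm_num, PySem.List.pyGetD_natCast]
      simp [List.getD]
    simp [hb, hp]
  · have hInt1 : ((k:Int) - 1) = ((k-1 : Nat) : Int) := by omega
    have hInt2 : ((k:Int) + 1) = ((k+1 : Nat) : Int) := by omega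
    have hbeq0 : ((k:Int) == 0) = (k == 0) := by
      simp [Bool.beq_eq_decide_eq]
    have hbeqn : ((k:Int) == (report.length : Int) - 1) = (k == report.length - 1) := by
      simp [Bool.beq_eq_decide_eq]; omega
    rw [hInt1, hInt2, hbeq0, hbeqn]
    simp only [PySem.List.pyGetD_natCast, gt_iff_lt]
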